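-- pv_equiv track=rewrite | github.com/anttipham/COMP.SE.610-Software-Engineering-Project-1 | src/lyyti/events.py | parse_custom_field
-- ===== SOURCE A (Python) =====
-- from typing import Sequence, TypedDict
--
-- class Custom(TypedDict):
--     """
--     Contains custom fields of an event.
--
--     The fields are optional and can be an empty string.
--     """
--
--     google_group_link: str
--     google_calendar_link: str
--
-- def parse_custom_field(custom: dict[str, dict[str, str]]) -> Custom:
--     """
--     From the given custom field in JSON response, return the Google Group link
--     and Google Calendar link.
--
--     If there's no Google Group link or Google Calendar link, returns Custom
--     with the corresponding field as an empty string.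
--
--     If the argument is not a dict, return Custom with empty string in all
--     fields.
--
--     Args:
--         custom (dict[str, dict[str, str]]): Custom field from Lyyti events
--
--     Returns:
--         Custom: Fields are empty strings if not found from args.
--     """
--     custom_fields = Custom(google_group_link="", google_calendar_link="")
--
--     if not isinstance(custom, dict):
--         return custom_fields
--
--     for content in custom.values():
--         if content.get("title", "") == "Google Group link":
--             custom_fields["google_group_link"] = content.get("answer", "")
--         if content.get("title", "") == "Google Calendar link":
--             custom_fields["google_calendar_link"] = content.get("answer", "")
--     return custom_fields
-- ===== SOURCE B (Python) =====
-- from typing import Sequence, TypedDict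
--
-- class Custom(TypedDict):
--     google_group_link: str
--     google_calendar_link: str
--
-- def _last_answer(vals, title):
--     # first match scanning back-to-front = last assignment of a forward loop
--     for content in reversed(vals):
--         if content.get("title", "") == title:
--             return content.get("answer", "")
--     return ""
--
-- def parse_custom_field(custom: dict[str, dict[str, str]]) -> Custom:
--     if not isinstance(custom, dict):
--         return Custom(google_group_link="", google_calendar_link="")
--     vals = list(custom.values())
--     return Custom(
--         google_group_link=_last_answer(vals, "Google Group link"),
--         google_calendar_link=_last_answer(vals, "Google Calendar link"),
--     )
-- ===== Notes on version B (the rewrite author's own statement) =====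
-- stated objective: alternative
-- what changed: Replaces A's single forward pass that keeps overwriting two accumulators with two staged back-to-front scans with early exit (first match in reverse = A's last assignment), one per requested title.
import Mathlib
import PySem

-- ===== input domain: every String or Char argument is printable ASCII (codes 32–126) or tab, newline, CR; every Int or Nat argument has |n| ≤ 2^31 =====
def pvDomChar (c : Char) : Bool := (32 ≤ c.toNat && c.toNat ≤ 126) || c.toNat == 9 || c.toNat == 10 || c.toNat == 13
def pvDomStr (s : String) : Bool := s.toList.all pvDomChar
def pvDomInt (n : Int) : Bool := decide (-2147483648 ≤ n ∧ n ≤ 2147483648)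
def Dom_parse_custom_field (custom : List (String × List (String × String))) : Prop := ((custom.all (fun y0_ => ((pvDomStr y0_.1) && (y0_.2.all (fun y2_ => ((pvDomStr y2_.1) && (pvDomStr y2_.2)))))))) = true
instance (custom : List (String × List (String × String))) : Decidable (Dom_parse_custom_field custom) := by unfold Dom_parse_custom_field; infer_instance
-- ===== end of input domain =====

-- B replaces A's forward overwrite loop by two staged back-to-front scans with early exit
-- (first match in reverse = A's last assignment); objective: alternative.

-- dict.get(k, dflt) on an association list (first match), shared by both ports
def pyAssocGetD (d : List (String × String)) (k dflt : String) : String :=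
  match d.find? (fun p => p.1 == k) with
  | some p => p.2
  | none => dflt

-- ===== PORT A =====
-- A: one forward loop over the values, two independent branch assignments into the result.
def parse_custom_field (custom : List (String × List (String × String))) : List (String × String) :=
  let st := custom.foldl (fun (st : String × String) c =>
    let st1 := if pyAssocGetD c.2 "title" "" == "Google Group link"
               then (pyAssocGetD c.2 "answer" "", st.2) else st
    if pyAssocGetD c.2 "title" "" == "Google Calendar link"
    then (st1.1, pyAssocGetD c.2 "answer" "") else st1) ("", "")
  [("google_group_link", st.1), ("google_calendar_link", st.2)]

-- ===== PORT B =====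
-- B's helper: scan reversed(vals), return the first matching answer (early exit), else "".
def lastAnswer (vals : List (String × List (String × String))) (title : String) : String :=
  match vals.reverse.find? (fun c => pyAssocGetD c.2 "title" "" == title) with
  | some c => pyAssocGetD c.2 "answer" ""
  | none => ""

def parse_custom_field_alt (custom : List (String × List (String × String))) : List (String × String) :=
  [("google_group_link", lastAnswer custom "Google Group link"),
   ("google_calendar_link", lastAnswer custom "Google Calendar link")]

-- ===== PRECONDITION & SPEC =====
def Spec_parse_custom_field (custom : List (String × List (String × String))) (out : List (String × String)) : Prop := out = parse_custom_field_alt custom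
instance (custom : List (String × List (String × String))) (out : List (String × String)) : Decidable (Spec_parse_custom_field custom out) := by unfold Spec_parse_custom_field; infer_instance

-- ===== CLAIM (what is proved, stated in full; the proofs are below) =====
def Claim_equal_parse_custom_field : Prop := ∀ (custom : List (String × List (String × String))), Dom_parse_custom_field custom → Spec_parse_custom_field custom (parse_custom_field custom)

-- ===== LEMMAS AND PROOFS =====

-- A's loop step, componentwise.
def stepA (st : String × String) (c : String × List (String × String)) : String × String :=
  let st1 := if pyAssocGetD c.2 "title" "" == "Google Group link"
             then (pyAssocGetD c.2 "answer" "", st.2) else st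
  if pyAssocGetD c.2 "title" "" == "Google Calendar link"
  then (st1.1, pyAssocGetD c.2 "answer" "") else st1

theorem stepA_fst (st : String × String) (c : String × List (String × String)) :
    (stepA st c).1 = if pyAssocGetD c.2 "title" "" == "Google Group link"
                     then pyAssocGetD c.2 "answer" "" else st.1 := by
  unfold stepA
  by_cases h1 : pyAssocGetD c.2 "title" "" == "Google Group link" <;>
    by_cases h2 : pyAssocGetD c.2 "title" "" == "Google Calendar link" <;>
    simp [h1, h2]

theorem stepA_snd (st : String × String) (c : String × List (String × String)) :
    (stepA st c).2 = if pyAssocGetD c.2 "title" "" == "Google Calendar link"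
                     then pyAssocGetD c.2 "answer" "" else st.2 := by
  unfold stepA
  by_cases h1 : pyAssocGetD c.2 "title" "" == "Google Group link" <;>
    by_cases h2 : pyAssocGetD c.2 "title" "" == "Google Calendar link" <;>
    simp [h1, h2]

-- A's pair fold decomposes into the two scalar folds.
theorem pair_fold (l : List (String × List (String × String))) (g c0 : String) :
    l.foldl stepA (g, c0)
    = (l.foldl (fun acc c =>
         if pyAssocGetD c.2 "title" "" == "Google Group link"
         then pyAssocGetD c.2 "answer" "" else acc) g,
       l.foldl (fun acc c =>
         if pyAssocGetD c.2 "title" "" == "Google Calendar link"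
         then pyAssocGetD c.2 "answer" "" else acc) c0) := by
  induction l generalizing g c0 with
  | nil => rfl
  | cons c t ih =>
    simp only [List.foldl_cons]
    rw [show stepA (g, c0) c = ((stepA (g, c0) c).1, (stepA (g, c0) c).2) from rfl, ih,
      stepA_fst, stepA_snd]

-- The scalar "keep overwriting on match" fold equals "first match scanning the reverse".
theorem fold_eq_rev_find (l : List (String × List (String × String))) (title g : String) :
    l.foldl (fun acc c =>
        if pyAssocGetD c.2 "title" "" == title
        then pyAssocGetD c.2 "answer" "" else acc) g
    = match l.reverse.find? (fun c => pyAssocGetD c.2 "title" "" == title) with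
      | some c => pyAssocGetD c.2 "answer" ""
      | none => g := by
  induction l generalizing g with
  | nil => rfl
  | cons c t ih =>
    simp only [List.foldl_cons, ih, List.reverse_cons, List.find?_append]
    cases h : t.reverse.find? (fun c => pyAssocGetD c.2 "title" "" == title) with
    | some c' => simp
    | none =>
      by_cases hc : pyAssocGetD c.2 "title" "" == title <;> simp [List.find?, hc]

-- ===== VERDICT (by name: the statement is the Claim_ definition above) =====
theorem parse_custom_field_spec : Claim_equal_parse_custom_field := by
  intro custom _
  show parse_custom_field custom = parse_custom_field_alt custom
  simp only [parse_custom_field, parse_custom_field_alt, lastAnswer,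
    show (fun (st : String × String) c =>
      let st1 := if pyAssocGetD c.2 "title" "" == "Google Group link"
                 then (pyAssocGetD c.2 "answer" "", st.2) else st
      if pyAssocGetD c.2 "title" "" == "Google Calendar link"
      then (st1.1, pyAssocGetD c.2 "answer" "") else st1) = stepA from rfl,
    pair_fold, fold_eq_rev_find]
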